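-- pv_equiv track=rewrite | github.com/houangrpg/MyMoneyGrouth | scripts/update_data_light.py | prev_last_valid
-- ===== SOURCE A (Python) =====
-- def prev_last_valid(values):
--     found = 0
--     for v in reversed(values):
--         if v is not None:
--             found += 1
--             if found == 2:
--                 return v
--     return None
-- ===== SOURCE B (Python) =====
-- def prev_last_valid(values):
--     vals = [v for v in values if v is not None]
--     return vals[-2] if len(vals) >= 2 else None
-- ===== Notes on version B (the rewrite author's own statement) =====
-- stated objective: simpler
-- what changed: Replaces the backward counter-scan with early exit by a filter-then-index decomposition: build the list of non-None values in forward order, then return the second-from-last by negative indexing.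
import Mathlib
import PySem

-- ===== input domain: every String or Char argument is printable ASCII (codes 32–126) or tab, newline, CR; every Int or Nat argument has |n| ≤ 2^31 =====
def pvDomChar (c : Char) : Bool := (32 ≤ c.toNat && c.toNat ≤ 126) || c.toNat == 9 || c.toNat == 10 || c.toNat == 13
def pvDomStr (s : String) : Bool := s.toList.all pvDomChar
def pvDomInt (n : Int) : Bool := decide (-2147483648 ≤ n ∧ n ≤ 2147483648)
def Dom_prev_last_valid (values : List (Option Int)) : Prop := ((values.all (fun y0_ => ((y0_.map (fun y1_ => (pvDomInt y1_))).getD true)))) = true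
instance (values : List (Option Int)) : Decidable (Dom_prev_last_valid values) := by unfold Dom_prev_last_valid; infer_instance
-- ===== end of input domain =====

-- B replaces A's backward counter-scan (early exit at the 2nd non-None) with a
-- filter-then-index decomposition: collect non-None values forward, take vals[-2]. Objective: simpler.

-- ===== PORT A =====
-- the for-loop over reversed(values) with the 'found' counter and early return
def prevLastLoopA : List (Option Int) → Int → Option Int
  | [], _ => none
  | v :: rest, found =>
    match v with
    | some x => if found + 1 = 2 then some x else prevLastLoopA rest (found + 1)
    | none => prevLastLoopA rest found

def prev_last_valid (values : List (Option Int)) : Option Int :=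
  prevLastLoopA values.reverse 0

-- ===== PORT B =====
def prev_last_valid_alt (values : List (Option Int)) : Option Int :=
  let vals : List Int := values.filterMap (fun v => v)
  if 2 ≤ vals.length then PySem.List.pyGet? vals (-2) else none

-- ===== PRECONDITION & SPEC =====
def Spec_prev_last_valid (values : List (Option Int)) (out : Option Int) : Prop := out = prev_last_valid_alt values
instance (values : List (Option Int)) (out : Option Int) : Decidable (Spec_prev_last_valid values out) := by unfold Spec_prev_last_valid; infer_instance

-- ===== CLAIM (what is proved, stated in full; the proofs are below) =====
def Claim_equal_prev_last_valid : Prop := ∀ (values : List (Option Int)), Dom_prev_last_valid values → Spec_prev_last_valid values (prev_last_valid values)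

-- ===== LEMMAS AND PROOFS =====

-- A's loop with counter 1 returns the first non-None element
theorem prevLastLoopA_one (l : List (Option Int)) :
    prevLastLoopA l 1 = (l.filterMap (fun v => v)).head? := by
  induction l with
  | nil => rfl
  | cons v rest ih =>
    cases v <;> simp [prevLastLoopA, ih]

-- A's loop with counter 0 returns the second non-None element
theorem prevLastLoopA_zero (l : List (Option Int)) :
    prevLastLoopA l 0 = (l.filterMap (fun v => v))[1]? := by
  induction l with
  | nil => rfl
  | cons v rest ih =>
    cases v with
    | none => simpa [prevLastLoopA] using ih
    | some x =>
      simp [prevLastLoopA, prevLastLoopA_one, List.head?_eq_getElem?]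

-- ===== VERDICT (by name: the statement is the Claim_ definition above) =====
theorem prev_last_valid_spec : Claim_equal_prev_last_valid := by
  intro values _
  unfold Spec_prev_last_valid prev_last_valid prev_last_valid_alt
  rw [prevLastLoopA_zero]
  rw [List.filterMap_reverse]
  set vals : List Int := values.filterMap (fun v => v) with hv
  by_cases h : 2 ≤ vals.length
  · rw [if_pos h, PySem.List.pyGet?_neg_ofNat vals 2 (by omega) h,
      List.getElem?_reverse (by omega)]
    congr 1
  · rw [if_neg h, List.getElem?_eq_none (by simp; omega)]
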